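-- pv_equiv track=rewrite | github.com/protruser/Algorithm | 프로그래머스/1/134240. 푸드 파이트 대회/푸드 파이트 대회.py | solution
-- ===== SOURCE A (Python) =====
-- def solution(food):
--     answer = ''
--     for i in range(len(food)-1,0,-1):
--         a = (food[i]-food[i]%2) //2
--         answer = a*str(i) + answer + a*str(i)
--
--     n = len(answer)//2
--     answer = answer[:n] + '0' + answer[n:]
--     return answer
-- ===== SOURCE B (Python) =====
-- def solution(food):
--     segs = [str(i) * (food[i] // 2) for i in range(1, len(food))]
--     return ''.join(segs) + '0' + ''.join(reversed(segs))
-- ===== Notes on version B (the rewrite author's own statement) =====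
-- stated objective: faster
-- what changed: B builds the per-food-type half segments once into a list and joins it forward and reversed around '0', replacing A's outward-wrapping repeated string concatenation and midpoint slice-splice.
import Mathlib
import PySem

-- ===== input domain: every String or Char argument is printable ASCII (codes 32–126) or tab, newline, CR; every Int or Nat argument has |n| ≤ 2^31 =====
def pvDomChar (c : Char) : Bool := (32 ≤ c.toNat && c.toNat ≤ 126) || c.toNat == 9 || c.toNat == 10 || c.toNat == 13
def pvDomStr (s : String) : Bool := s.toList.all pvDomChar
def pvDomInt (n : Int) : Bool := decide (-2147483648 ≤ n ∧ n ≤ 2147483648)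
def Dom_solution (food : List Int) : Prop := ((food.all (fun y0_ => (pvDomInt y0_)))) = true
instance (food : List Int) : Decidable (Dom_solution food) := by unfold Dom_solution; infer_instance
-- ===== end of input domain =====

-- B builds the list of per-food half-segments once and joins it forward and backward around '0',
-- instead of A's outward-wrapping repeated string concatenation plus a midpoint splice (objective: faster).

-- ===== PORT A =====
-- A's loop state is the accumulated string `answer` (kept as List Char, returned via String.ofList);
-- for i in range(len(food)-1, 0, -1): a = (food[i]-food[i]%2)//2; answer = a*str(i) + answer + a*str(i)
-- food[i] is always in range here, so pyGetD with a junk default 0 is exact.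
def solution (food : List Int) : String :=
  let answer : List Char :=
    (PySem.List.pyRange ((food.length : Int) - 1) 0 (-1)).foldl
      (fun answer i =>
        let a : Int := PySem.Int.floordiv
          (PySem.List.pyGetD food i 0 - PySem.Int.mod (PySem.List.pyGetD food i 0) 2) 2
        PySem.List.pyRepeat (PySem.Int.toChars i) a ++ answer
          ++ PySem.List.pyRepeat (PySem.Int.toChars i) a) []
  let n : Int := PySem.Int.floordiv (answer.length : Int) 2
  String.ofList (PySem.List.slice answer none (some n) ++ ['0'] ++ PySem.List.slice answer (some n) none)

-- ===== PORT B =====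
-- segs = [str(i) * (food[i] // 2) for i in range(1, len(food))]
-- return ''.join(segs) + '0' + ''.join(reversed(segs))
def solution_alt (food : List Int) : String :=
  let segs : List (List Char) :=
    (PySem.List.pyRange 1 (food.length : Int) 1).map
      (fun i => PySem.List.pyRepeat (PySem.Int.toChars i)
        (PySem.Int.floordiv (PySem.List.pyGetD food i 0) 2))
  String.ofList (segs.flatten ++ ['0'] ++ segs.reverse.flatten)

-- ===== PRECONDITION & SPEC =====
def Spec_solution (food : List Int) (out : String) : Prop := out = solution_alt food
instance (food : List Int) (out : String) : Decidable (Spec_solution food out) := by unfold Spec_solution; infer_instance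

-- ===== CLAIM (what is proved, stated in full; the proofs are below) =====
def Claim_equal_solution : Prop := ∀ (food : List Int), Dom_solution food → Spec_solution food (solution food)

-- ===== LEMMAS AND PROOFS =====

-- the wrapped accumulation of A unrolls to (reversed segments) ++ acc ++ (segments)
theorem pv_foldl_wrap (s : Int → List Char) :
    ∀ (l : List Int) (acc : List Char),
      l.foldl (fun ans i => s i ++ ans ++ s i) acc
        = (l.reverse.map s).flatten ++ acc ++ (l.map s).flatten := by
  intro l
  induction l with
  | nil => simp
  | cons i t ih =>
    intro acc
    simp only [List.foldl_cons, ih, List.reverse_cons, List.map_append, List.map_cons,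
      List.map_nil, List.flatten_append, List.flatten_cons, List.flatten_nil]
    simp [List.append_assoc]

theorem pv_half_div (x : Int) :
    PySem.Int.floordiv (x - PySem.Int.mod x 2) 2 = PySem.Int.floordiv x 2 := by
  rw [PySem.Int.mod_eq_emod_of_pos (by norm_num : (0:Int) < 2),
      PySem.Int.floordiv_eq_ediv_of_pos (by norm_num : (0:Int) < 2),
      PySem.Int.floordiv_eq_ediv_of_pos (by norm_num : (0:Int) < 2)]
  omega

-- ===== VERDICT (by name: the statement is the Claim_ definition above) =====
theorem solution_spec : Claim_equal_solution := by
  intro food _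
  unfold Spec_solution solution solution_alt
  set s : Int → List Char := fun i => PySem.List.pyRepeat (PySem.Int.toChars i)
    (PySem.Int.floordiv (PySem.List.pyGetD food i 0) 2) with hs
  have hbody : (fun (ans : List Char) (i : Int) =>
      let a : Int := PySem.Int.floordiv
        (PySem.List.pyGetD food i 0 - PySem.Int.mod (PySem.List.pyGetD food i 0) 2) 2
      PySem.List.pyRepeat (PySem.Int.toChars i) a ++ ans
        ++ PySem.List.pyRepeat (PySem.Int.toChars i) a)
      = fun ans i => s i ++ ans ++ s i := by
    funext ans i
    simp only [hs, pv_half_div]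
  have hrev : PySem.List.pyRange ((food.length : Int) - 1) 0 (-1)
      = (PySem.List.pyRange 1 (food.length : Int) 1).reverse := by
    rw [PySem.List.pyRange_neg_one_eq_reverse]
    norm_num
  simp only [hbody, pv_foldl_wrap s, hrev, List.reverse_reverse, List.append_nil,
    List.map_reverse]
  set segs : List (List Char) := (PySem.List.pyRange 1 (food.length : Int) 1).map s with hsegs
  set F : List Char := segs.flatten with hF
  set R : List Char := segs.reverse.flatten with hR
  have hlen : R.length = F.length := by
    simp [hF, hR, List.length_flatten, List.map_reverse, List.sum_reverse]
  have hmid : PySem.Int.floordiv (((F ++ R).length : Int)) 2 = (F.length : Int) := by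
    rw [PySem.Int.floordiv_eq_ediv_of_pos (by norm_num : (0:Int) < 2)]
    simp only [List.length_append]
    omega
  rw [hmid, PySem.List.slice_to _ (by positivity), PySem.List.slice_from _ (by positivity)]
  simp
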